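-- pv_equiv track=rewrite | github.com/jaekwanyda/algorithm | DFS-BFS/18(괄호변환).py | solution
-- ===== SOURCE A (Python) =====
-- def balance(p): #균형잡힌 괄호 문자열 출력해주는 함수
--     #가능한 첫 균형잡힌 골호 문자열을 u로 만들기
--     left=0 #왼쪽 괄호 수
--     right=0 #오른쪽 괄호 수
--     u_index=0
--     for i in range(len(p)):
--         if p[i]=='(':
--             left+=1
--         else:
--             right+=1
--         u_index+=1
--         if left==right:
--             break
--     u=p[:u_index] #u 생성
--     v=p[u_index:] #v 생성
--     return (u,v)
--
-- def correct(p): #올바른 괄호 문자열인지 확인하는 함수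
--     left=0
--     right=0
--     for i in range(len(p)):
--         if p[i]=='(':
--             left+=1
--         else:
--             right+=1
--         if left<right:
--             return False
--     return True
--
-- def solution(p):
--     answer = ''
--     if p=='':
--         return answer
--     u,v=balance(p)[0],balance(p)[1]
--     if correct(u):
--         answer=u+solution(v)
--     else:
--         answer='('
--         answer+=solution(v)
--         answer+=')'
--         u=list(u[1:-1])
--         for i in range(len(u)):
--             if u[i]=="(":
--                 answer+=')'
--             else:
--                 answer+='('
--     return answer
-- ===== SOURCE B (Python) =====
-- def solution(p):
--     # one-pass tokenization into first-balanced primitive units, then a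
--     # right-to-left fold building the answer (no recursion on the suffix)
--     units = []
--     buf = []
--     bal = 0
--     for ch in p:
--         buf.append(ch)
--         bal += 1 if ch == '(' else -1
--         if bal == 0:
--             units.append(''.join(buf))
--             buf = []
--     if buf:
--         units.append(''.join(buf))
--     res = ''
--     for unit in reversed(units):
--         if _ok(unit):
--             res = unit + res
--         else:
--             res = '(' + res + ')' + ''.join(')' if c == '(' else '(' for c in unit[1:-1])
--     return res
--
-- def _ok(u):
--     bal = 0
--     for ch in u:
--         bal += 1 if ch == '(' else -1
--         if bal < 0:
--             return False
--     return True
-- ===== Notes on version B (the rewrite author's own statement) =====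
-- stated objective: alternative
-- what changed: Replaces A's recursion on the suffix (re-splitting with balance() each level) by a single-pass tokenization into first-balanced primitive units followed by a right-to-left fold that assembles the answer iteratively.
import Mathlib
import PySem

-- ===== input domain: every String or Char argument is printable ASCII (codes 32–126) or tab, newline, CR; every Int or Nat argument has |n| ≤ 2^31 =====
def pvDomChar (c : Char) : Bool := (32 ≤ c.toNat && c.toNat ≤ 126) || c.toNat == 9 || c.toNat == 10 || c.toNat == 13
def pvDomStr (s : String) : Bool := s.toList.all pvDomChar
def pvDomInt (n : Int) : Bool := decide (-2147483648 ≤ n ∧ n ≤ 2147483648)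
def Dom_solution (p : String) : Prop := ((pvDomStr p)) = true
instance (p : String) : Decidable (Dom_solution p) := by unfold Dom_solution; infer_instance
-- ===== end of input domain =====

-- B replaces A's recursion on the suffix by one-pass tokenization into primitive units
-- plus a right-to-left fold assembling the answer (objective: alternative decomposition).

-- ===== PORT A =====
-- the 'for i in range(len(p))' loop of balance(), with its break
def balanceLoop : List Char → Int → Int → Nat → Nat
  | [], _, _, u_index => u_index
  | c :: rest, left, right, u_index =>
    let left := if c = '(' then left + 1 else left
    let right := if c = '(' then right else right + 1
    let u_index := u_index + 1
    if left = right then u_index else balanceLoop rest left right u_index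

-- balance(p) = (p[:u_index], p[u_index:]); u_index is a Nat ≤ len, so take/drop are the slices
def balanceA (l : List Char) : List Char × List Char :=
  let u_index := balanceLoop l 0 0 0
  (l.take u_index, l.drop u_index)

-- the loop of correct()
def correctLoop : List Char → Int → Int → Bool
  | [], _, _ => true
  | c :: rest, left, right =>
    let left := if c = '(' then left + 1 else left
    let right := if c = '(' then right else right + 1
    if left < right then false else correctLoop rest left right

-- the 'for i in range(len(u))' flip loop of solution's else branch, appending to answer
def flipLoop : List Char → List Char → List Char
  | [], answer => answer
  | c :: rest, answer => flipLoop rest (answer ++ [if c = '(' then ')' else '('])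

theorem balanceLoop_succ (l : List Char) (a b : Int) (u : Nat) :
    balanceLoop l a b (u + 1) = balanceLoop l a b u + 1 := by
  induction l generalizing a b u with
  | nil => rfl
  | cons c rest ih =>
    simp only [balanceLoop]
    split_ifs <;> simp [ih]

theorem one_le_balanceLoop (c : Char) (rest : List Char) :
    1 ≤ balanceLoop (c :: rest) 0 0 0 := by
  simp only [balanceLoop]
  split_ifs <;> (try rw [balanceLoop_succ]) <;> omega

-- solution(p), recursing on the suffix v; strings handled as their char lists
def solutionCore (l : List Char) : List Char :=
  if l.isEmpty then []
  else
    let u := (balanceA l).1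
    let v := (balanceA l).2
    if correctLoop u 0 0 then u ++ solutionCore v
    else ['('] ++ solutionCore v ++ [')'] ++ flipLoop ((u.drop 1).dropLast) []
         -- u[1:-1] = (u.drop 1).dropLast exactly (empty for len ≤ 1)
termination_by l.length
decreasing_by
  all_goals
    cases l with
    | nil => simp at *
    | cons c rest =>
      simp only [balanceA, List.length_drop, List.length_cons]
      have := one_le_balanceLoop c rest
      omega

def solution (p : String) : String := String.ofList (solutionCore p.toList)

-- ===== PORT B =====
-- one-pass tokenizer: cut each time the running balance returns to 0
def tokenizeB : List Char → List Char → Int → List (List Char)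
  | [], buf, _ => if buf.isEmpty then [] else [buf]
  | c :: rest, buf, bal =>
    let buf := buf ++ [c]
    let bal := bal + (if c = '(' then 1 else -1)
    if bal = 0 then buf :: tokenizeB rest [] 0 else tokenizeB rest buf bal

-- _ok(u): running balance never negative
def okB : List Char → Int → Bool
  | [], _ => true
  | c :: rest, bal =>
    let bal := bal + (if c = '(' then 1 else -1)
    if bal < 0 then false else okB rest bal

-- the 'for unit in reversed(units)' fold; flip is a map comprehension
def stepB (res unit : List Char) : List Char :=
  if okB unit 0 then unit ++ res
  else ['('] ++ res ++ [')'] ++ ((unit.drop 1).dropLast).map (fun c => if c = '(' then ')' else '(')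

def solution_alt (p : String) : String :=
  String.ofList ((tokenizeB p.toList [] 0).reverse.foldl stepB [])

-- ===== PRECONDITION & SPEC =====
def Spec_solution (p : String) (out : String) : Prop := out = solution_alt p
instance (p : String) (out : String) : Decidable (Spec_solution p out) := by unfold Spec_solution; infer_instance

-- ===== CLAIM (what is proved, stated in full; the proofs are below) =====
def Claim_equal_solution : Prop := ∀ (p : String), Dom_solution p → Spec_solution p (solution p)

-- ===== LEMMAS AND PROOFS =====

-- A's two counters and B's single balance agree
theorem correct_eq_ok (l : List Char) (left right : Int) :
    correctLoop l left right = okB l (left - right) := by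
  induction l generalizing left right with
  | nil => rfl
  | cons c rest ih =>
    simp only [correctLoop, okB]
    by_cases hc : c = '('
    · simp only [hc, if_true]
      have : left + 1 - right = left - right + 1 := by ring
      rw [← this, ← ih]
      split_ifs with h1 h2 h2 <;> first | rfl | omega
    · simp only [if_neg hc]
      have he : left - (right + 1) = left - right + -1 := by ring
      rw [← he, ← ih]
      split_ifs with h1 h2 h2 <;> first | rfl | omega

-- A's flip loop is B's map
theorem flipLoop_eq_map (l acc : List Char) :
    flipLoop l acc = acc ++ l.map (fun c => if c = '(' then ')' else '(') := by
  induction l generalizing acc with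
  | nil => simp [flipLoop]
  | cons c rest ih => simp [flipLoop, ih]

-- the tokenizer peels off exactly the unit balance() would cut
theorem tokenizeB_split (l buf : List Char) (left right bal : Int)
    (hb : bal = left - right) (hne : buf ++ l ≠ []) :
    tokenizeB l buf bal =
      (buf ++ l.take (balanceLoop l left right 0)) ::
        tokenizeB (l.drop (balanceLoop l left right 0)) [] 0 := by
  induction l generalizing buf left right bal with
  | nil =>
    simp only [List.append_nil] at hne
    simp [tokenizeB, balanceLoop, hne]
  | cons c rest ih =>
    simp only [tokenizeB, balanceLoop]
    by_cases hc : c = '('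
    · simp only [hc, if_true]
      by_cases hz : bal + 1 = 0
      · have : left + 1 = right := by omega
        simp [hz, this]
      · have hlr : ¬ (left + 1 = right) := by omega
        rw [if_neg hz, if_neg hlr,
            show (0:Nat) + 1 = 0 + 1 from rfl, balanceLoop_succ,
            ih (buf ++ ['(']) (left + 1) right (bal + 1) (by omega) (by simp)]
        simp
    · simp only [if_neg hc]
      by_cases hz : bal + -1 = 0
      · have : left = right + 1 := by omega
        simp [hz, this]
      · have hlr : ¬ (left = right + 1) := by omega
        rw [if_neg hz, if_neg hlr,
            show (0:Nat) + 1 = 0 + 1 from rfl, balanceLoop_succ,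
            ih (buf ++ [c]) left (right + 1) (bal + -1) (by omega) (by simp)]
        simp

-- fold over reversed units, unit by unit
theorem build_cons (u : List Char) (rest : List (List Char)) :
    ((u :: rest).reverse.foldl stepB []) = stepB (rest.reverse.foldl stepB []) u := by
  simp [List.foldl_append]

-- main induction: the fold over the token list equals A's recursion on the suffix
theorem core_eq (l : List Char) :
    (tokenizeB l [] 0).reverse.foldl stepB [] = solutionCore l := by
  induction hn : l.length using Nat.strong_induction_on generalizing l with
  | _ n ih =>
    cases l with
    | nil => simp [tokenizeB, solutionCore]
    | cons c rest =>
      have hsplit := tokenizeB_split (c :: rest) [] 0 0 0 (by ring) (by simp)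
      set k := balanceLoop (c :: rest) 0 0 0 with hk
      have hk1 : 1 ≤ k := one_le_balanceLoop c rest
      rw [hsplit, build_cons]
      have hlt : ((c :: rest).drop k).length < n := by
        rw [← hn]; simp only [List.length_drop, List.length_cons]; omega
      rw [ih _ hlt _ rfl]
      rw [show solutionCore (c :: rest) =
            if correctLoop ((balanceA (c :: rest)).1) 0 0 then
              (balanceA (c :: rest)).1 ++ solutionCore ((balanceA (c :: rest)).2)
            else ['('] ++ solutionCore ((balanceA (c :: rest)).2) ++ [')'] ++
              flipLoop (((balanceA (c :: rest)).1.drop 1).dropLast) [] from by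
        rw [solutionCore]; simp]
      simp only [stepB, balanceA, ← hk, List.nil_append]
      rw [correct_eq_ok _ 0 0, flipLoop_eq_map]
      norm_num

-- ===== VERDICT (by name: the statement is the Claim_ definition above) =====
theorem solution_spec : Claim_equal_solution := by
  intro p _
  unfold Spec_solution solution solution_alt
  rw [core_eq]
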